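-- pv_equiv track=rewrite | github.com/SeongUk18/codetree-TILs | 241108/십자 모양 폭발/cross-shape-bomb.py | explode_and_apply_gravity
-- ===== SOURCE A (Python) =====
-- def explode_and_apply_gravity(grid, x, y):
--     n = len(grid)
--     power = grid[x][y]
--
--     # Step 1: 폭탄 폭발
--     for i in range(-power + 1, power):
--         if 0 <= x + i < n:
--             grid[x + i][y] = 0  # 상하 폭발
--         if 0 <= y + i < n:
--             grid[x][y + i] = 0  # 좌우 폭발
--
--     # Step 2: 중력 적용
--     for col in range(n):
--         empty_row = n - 1
--         for row in range(n - 1, -1, -1):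
--             if grid[row][col] != 0:
--                 grid[empty_row][col] = grid[row][col]
--                 if empty_row != row:
--                     grid[row][col] = 0
--                 empty_row -= 1
--
--     return grid
-- ===== SOURCE B (Python) =====
-- def explode_and_apply_gravity(grid, x, y):
--     n = len(grid)
--     power = grid[x][y]
--
--     # Step 1: cross-shaped explosion (inherently fixed by the problem)
--     for i in range(-power + 1, power):
--         if 0 <= x + i < n:
--             grid[x + i][y] = 0
--         if 0 <= y + i < n:
--             grid[x][y + i] = 0
--
--     # Step 2: gravity, per column as gather-then-scatter:
--     # collect the surviving values, then rewrite the column top-to-bottom.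
--     for col in range(n):
--         vals = [grid[r][col] for r in range(n) if grid[r][col] != 0]
--         k = n - len(vals)
--         for r in range(k):
--             grid[r][col] = 0
--         for r in range(k, n):
--             grid[r][col] = vals[r - k]
--
--     return grid
-- ===== Notes on version B (the rewrite author's own statement) =====
-- stated objective: idiomatic
-- what changed: The gravity step's fused two-pointer bottom-up scan per column is replaced by a gather-then-scatter: collect the surviving (non-zero) values of the column with a comprehension, then rewrite the column top-to-bottom as zeros followed by the collected values; the explosion loop is fixed by the problem and kept.
import Mathlib
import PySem

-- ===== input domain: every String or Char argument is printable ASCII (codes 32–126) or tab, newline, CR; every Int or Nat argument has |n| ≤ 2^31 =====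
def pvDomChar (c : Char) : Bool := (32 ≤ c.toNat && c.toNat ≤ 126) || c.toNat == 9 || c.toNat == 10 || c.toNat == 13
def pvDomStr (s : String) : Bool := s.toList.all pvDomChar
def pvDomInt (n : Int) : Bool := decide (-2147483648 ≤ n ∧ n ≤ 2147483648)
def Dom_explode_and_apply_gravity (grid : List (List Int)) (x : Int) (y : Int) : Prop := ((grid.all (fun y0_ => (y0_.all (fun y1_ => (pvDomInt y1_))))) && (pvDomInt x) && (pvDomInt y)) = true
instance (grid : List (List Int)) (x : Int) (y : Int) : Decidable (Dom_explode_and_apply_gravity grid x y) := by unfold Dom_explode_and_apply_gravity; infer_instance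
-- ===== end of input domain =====

-- B rewrites the gravity step as a per-column gather-then-scatter (collect non-zeros, then
-- write zeros and the collected values top-to-bottom) instead of A's fused bottom-up
-- two-pointer scan; same return value, and the Python B performs the same in-place mutation.

-- grid[r][c]  (Python indexing; in range under Pre_)
def pvCell (g : List (List Int)) (r c : Int) : Int :=
  PySem.List.pyGetD (PySem.List.pyGetD g r []) c 0

-- grid[r][c] = v  (Python indexing; in range under Pre_)
def pvSetCell (g : List (List Int)) (r c : Int) (v : Int) : List (List Int) :=
  PySem.List.pySetD g r (PySem.List.pySetD (PySem.List.pyGetD g r []) c v)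

-- ===== PORT A =====
def explode_and_apply_gravity (grid : List (List Int)) (x : Int) (y : Int) : List (List Int) :=
  let n : Int := grid.length
  let power : Int := pvCell grid x y
  -- Step 1: explosion
  let g1 := (PySem.List.pyRange (-power + 1) power 1).foldl (fun g i =>
    let g := if 0 ≤ x + i ∧ x + i < n then pvSetCell g (x + i) y 0 else g
    if 0 ≤ y + i ∧ y + i < n then pvSetCell g x (y + i) 0 else g) grid
  -- Step 2: gravity, fused bottom-up two-pointer scan per column
  (PySem.List.pyRange 0 n 1).foldl (fun g col =>
    ((PySem.List.pyRange (n - 1) (-1) (-1)).foldl (fun st row =>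
        if pvCell st.1 row col ≠ 0 then
          let g' := pvSetCell st.1 st.2 col (pvCell st.1 row col)
          let g'' := if st.2 ≠ row then pvSetCell g' row col 0 else g'
          (g'', st.2 - 1)
        else st)
      (g, n - 1)).1) g1

-- ===== PORT B =====
def explode_and_apply_gravity_alt (grid : List (List Int)) (x : Int) (y : Int) : List (List Int) :=
  let n : Int := grid.length
  let power : Int := pvCell grid x y
  -- Step 1: explosion (fixed by the problem, same as A)
  let g1 := (PySem.List.pyRange (-power + 1) power 1).foldl (fun g i =>
    let g := if 0 ≤ x + i ∧ x + i < n then pvSetCell g (x + i) y 0 else g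
    if 0 ≤ y + i ∧ y + i < n then pvSetCell g x (y + i) 0 else g) grid
  -- Step 2: gravity, gather-then-scatter per column
  (PySem.List.pyRange 0 n 1).foldl (fun g col =>
    let vals := ((PySem.List.pyRange 0 n 1).filter
        (fun r => decide (pvCell g r col ≠ 0))).map (fun r => pvCell g r col)
    let k : Int := n - vals.length
    let g2 := (PySem.List.pyRange 0 k 1).foldl (fun g r => pvSetCell g r col 0) g
    (PySem.List.pyRange k n 1).foldl
      (fun g r => pvSetCell g r col (PySem.List.pyGetD vals (r - k) 0)) g2) g1

-- ===== PRECONDITION & SPEC =====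
-- Pre_ restricts to the function's natural domain: a non-empty square n×n board with the bomb
-- cell index (Python indexing, negative allowed) in range; on ragged grids A raises IndexError
-- in the explosion or gravity step except when every row is at least n long, where the extra
-- cells are outside the intended board (see claim cites).
def Pre_explode_and_apply_gravity (grid : List (List Int)) (x : Int) (y : Int) : Prop :=
  (∀ row ∈ grid, row.length = grid.length) ∧
  PySem.Raise.InRange grid.length x ∧ PySem.Raise.InRange grid.length y
instance (grid : List (List Int)) (x : Int) (y : Int) : Decidable (Pre_explode_and_apply_gravity grid x y) := by unfold Pre_explode_and_apply_gravity; infer_instance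

def pvWitness_explode_and_apply_gravity : List (List Int) × Int × Int := ([[1, 0], [2, 3]], 0, 1)

def Spec_explode_and_apply_gravity (grid : List (List Int)) (x : Int) (y : Int) (out : List (List Int)) : Prop := out = explode_and_apply_gravity_alt grid x y
instance (grid : List (List Int)) (x : Int) (y : Int) (out : List (List Int)) : Decidable (Spec_explode_and_apply_gravity grid x y out) := by unfold Spec_explode_and_apply_gravity; infer_instance

-- ===== CLAIM (what is proved, stated in full; the proofs are below) =====
def Claim_equal_explode_and_apply_gravity : Prop := ∀ (grid : List (List Int)) (x : Int) (y : Int), Dom_explode_and_apply_gravity grid x y → Pre_explode_and_apply_gravity grid x y → Spec_explode_and_apply_gravity grid x y (explode_and_apply_gravity grid x y)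

-- ===== LEMMAS AND PROOFS =====

-- a square grid: every row as long as the grid is high
def Sq (g : List (List Int)) : Prop := ∀ row ∈ g, row.length = g.length

-- the non-zero entries, in order
def nzf (l : List Int) : List Int := l.filter (fun v => decide (v ≠ 0))

-- the column col of g, top to bottom
def colOf (g : List (List Int)) (col : Int) : List Int :=
  (PySem.List.pyRange 0 (g.length : Int) 1).map (fun r => pvCell g r col)

lemma map_filter_comp {α β : Type} (f : α → β) (p : β → Bool) (l : List α) :
    (l.filter (fun a => p (f a))).map f = (l.map f).filter p := by
  induction l with
  | nil => simp
  | cons a l ih => by_cases h : p (f a) <;> simp [h, ih]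


lemma len_pySetD {α : Type} (xs : List α) (i : Int) (v : α) :
    (PySem.List.pySetD xs i v).length = xs.length := by
  unfold PySem.List.pySetD PySem.List.pySet?
  cases PySem.List.pyIdx? xs.length i <;> simp only [Option.map_some, Option.map_none, Option.getD_some, Option.getD_none, List.length_set]

lemma inRange_of_pyIdx?_eq_some {n : Nat} {i : Int} {k : Nat}
    (h : PySem.List.pyIdx? n i = some k) : PySem.Raise.InRange n i := by
  unfold PySem.List.pyIdx? at h
  unfold PySem.Raise.InRange
  split_ifs at h <;> omega

lemma pyIdx?_of_inbounds {n : Nat} {i : Int} (h0 : 0 ≤ i) (h1 : i < n) :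
    PySem.List.pyIdx? n i = some i.toNat := by
  unfold PySem.List.pyIdx?
  rw [if_pos h0, if_pos h1]

lemma pySetD_of_inbounds {α : Type} (xs : List α) {i : Int} (v : α)
    (h0 : 0 ≤ i) (h1 : i < xs.length) :
    PySem.List.pySetD xs i v = xs.set i.toNat v := by
  unfold PySem.List.pySetD PySem.List.pySet?
  rw [pyIdx?_of_inbounds h0 h1]
  rfl

lemma len_pvSetCell (g : List (List Int)) (r c : Int) (v : Int) :
    (pvSetCell g r c v).length = g.length := by
  unfold pvSetCell
  exact len_pySetD ..

lemma sq_pvSetCell {g : List (List Int)} (hsq : Sq g) (r c : Int) (v : Int) :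
    Sq (pvSetCell g r c v) := by
  intro row hrow
  rw [len_pvSetCell]
  have hnr : pvSetCell g r c v
      = PySem.List.pySetD g r (PySem.List.pySetD (PySem.List.pyGetD g r []) c v) := rfl
  rw [hnr] at hrow
  generalize hN : PySem.List.pySetD (PySem.List.pyGetD g r []) c v = nr at hrow
  unfold PySem.List.pySetD PySem.List.pySet? at hrow
  cases h : PySem.List.pyIdx? g.length r with
  | none => rw [h] at hrow; exact hsq _ (by simpa using hrow)
  | some k =>
    rw [h] at hrow
    simp only [Option.map_some, Option.getD_some] at hrow
    rcases List.mem_or_eq_of_mem_set hrow with hmem | heq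
    · exact hsq _ hmem
    · subst heq
      rw [← hN, len_pySetD]
      exact hsq _ (PySem.List.pyGetD_mem g [] (inRange_of_pyIdx?_eq_some h))

lemma pvCell_natCast {g : List (List Int)} (r c : Nat) :
    pvCell g r c = (g.getD r []).getD c 0 := by
  simp [pvCell, PySem.List.pyGetD_natCast]


lemma pvCell_eq_getElem {g : List (List Int)} {r c : Nat} (hr : r < g.length)
    (hc : c < (g[r]'hr).length) : pvCell g r c = (g[r]'hr)[c]'hc := by
  rw [pvCell_natCast, List.getD_eq_getElem _ _ hr, List.getD_eq_getElem _ _ hc]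

-- get-after-set, all indices in range, set indices given as Ints
lemma pvCell_pvSetCell {g : List (List Int)} (hsq : Sq g) {r c : Int} (v : Int)
    (hr0 : 0 ≤ r) (hrn : r < g.length) (hc0 : 0 ≤ c) (hcn : c < g.length)
    (r' c' : Nat) (hr' : r' < g.length) (hc' : c' < g.length) :
    pvCell (pvSetCell g r c v) r' c' =
      if (r' : Int) = r ∧ (c' : Int) = c then v else pvCell g r' c' := by
  have hrn' : r.toNat < g.length := by omega
  have hrow : PySem.List.pyGetD g r [] = g[r.toNat]'hrn' :=
    PySem.List.pyGetD_eq_getElem g [] hr0 hrn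
  have hrowlen : (g[r.toNat]'hrn').length = g.length := hsq _ (List.getElem_mem _)
  have hset : pvSetCell g r c v = g.set r.toNat ((g[r.toNat]'hrn').set c.toNat v) := by
    unfold pvSetCell
    rw [hrow, pySetD_of_inbounds _ v hc0 (by rw [hrowlen]; omega),
        pySetD_of_inbounds _ _ hr0 hrn]
  rw [hset]
  have hgl : ∀ (j : Nat) (hj : j < g.length), (g[j]'hj).length = g.length :=
    fun j hj => hsq _ (List.getElem_mem _)
  have h1 : r' < (g.set r.toNat ((g[r.toNat]'hrn').set c.toNat v)).length := by
    simpa using hr'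
  have h2 : c' < ((g.set r.toNat ((g[r.toNat]'hrn').set c.toNat v))[r']'h1).length := by
    rw [List.getElem_set]
    split
    · rw [List.length_set, hrowlen]; omega
    · rw [hgl r' hr']; omega
  rw [pvCell_eq_getElem h1 h2,
      pvCell_eq_getElem hr' (show c' < (g[r']'hr').length by rw [hgl r' hr']; omega)]
  by_cases hR : r.toNat = r'
  · have : (r' : Int) = r := by omega
    simp only [List.getElem_set, hR, this, true_and]
    by_cases hC : c.toNat = c'
    · have hc2 : (c' : Int) = c := by omega
      simp [hC, hc2]
    · have hc2 : ¬ ((c' : Int) = c) := by omega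
      simp [hC, hc2]
  · have : ¬ ((r' : Int) = r) := by omega
    simp only [List.getElem_set, if_neg hR, if_neg (by tauto : ¬ ((r' : Int) = r ∧ (c' : Int) = c))]

-- two square grids with the same size and entries are equal
lemma grid_ext {g1 g2 : List (List Int)} (hsq1 : Sq g1) (hsq2 : Sq g2)
    (hlen : g1.length = g2.length)
    (hval : ∀ r c : Nat, r < g1.length → c < g1.length → pvCell g1 r c = pvCell g2 r c) :
    g1 = g2 := by
  apply List.ext_getElem hlen
  intro r h1 h2
  have hl1 : (g1[r] : List Int).length = g1.length := hsq1 _ (List.getElem_mem _)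
  have hl2 : (g2[r] : List Int).length = g2.length := hsq2 _ (List.getElem_mem _)
  apply List.ext_getElem (by omega)
  intro c hc1 hc2
  have := hval r c h1 (by omega)
  rw [pvCell_natCast, pvCell_natCast,
      List.getD_eq_getElem _ _ h1, List.getD_eq_getElem _ _ h2,
      List.getD_eq_getElem _ _ hc1, List.getD_eq_getElem _ _ hc2] at this
  exact this

-- characterization of B's scatter loop
lemma scatter_aux (col : Int) (f : Int → Int) :
    ∀ (d : Nat) (a b : Int) (g : List (List Int)), (b - a).toNat = d → Sq g → 0 ≤ a →
    b ≤ g.length → 0 ≤ col → col < g.length →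
    (((PySem.List.pyRange a b 1).foldl (fun g r => pvSetCell g r col (f r)) g).length = g.length ∧
     Sq ((PySem.List.pyRange a b 1).foldl (fun g r => pvSetCell g r col (f r)) g)) ∧
    (∀ r c' : Nat, r < g.length → c' < g.length →
      pvCell ((PySem.List.pyRange a b 1).foldl (fun g r => pvSetCell g r col (f r)) g) r c' =
        if (c' : Int) = col ∧ a ≤ (r : Int) ∧ (r : Int) < b then f r else pvCell g r c') := by
  intro d
  induction d with
  | zero =>
    intro a b g hd hsq ha hb hc0 hcn
    rw [PySem.List.pyRange_one_eq_nil (by omega)]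
    simp only [List.foldl_nil]
    refine ⟨⟨trivial, hsq⟩, ?_⟩
    intro r c' hr hc
    rw [if_neg (by omega)]
  | succ d ih =>
    intro a b g hd hsq ha hb hc0 hcn
    have hab : a < b := by omega
    rw [PySem.List.pyRange_one_cons hab]
    simp only [List.foldl_cons]
    have hlen' : (pvSetCell g a col (f a)).length = g.length := len_pvSetCell g a col (f a)
    have hsq' : Sq (pvSetCell g a col (f a)) := sq_pvSetCell hsq a col (f a)
    obtain ⟨⟨ihlen, ihsq⟩, ihval⟩ := ih (a + 1) b (pvSetCell g a col (f a)) (by omega) hsq'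
      (by omega) (by rw [hlen']; exact hb) hc0 (by rw [hlen']; exact hcn)
    refine ⟨⟨by rw [ihlen, hlen'], ihsq⟩, ?_⟩
    intro r c' hr hc
    rw [ihval r c' (by rw [hlen']; exact hr) (by rw [hlen']; exact hc),
        pvCell_pvSetCell hsq (f a) ha (by omega) hc0 hcn r c' hr hc]
    by_cases h1 : (c' : Int) = col ∧ a + 1 ≤ (r : Int) ∧ (r : Int) < b
    · rw [if_pos h1, if_pos (by omega : (c' : Int) = col ∧ a ≤ (r : Int) ∧ (r : Int) < b)]
    · rw [if_neg h1]
      by_cases h2 : (r : Int) = a ∧ (c' : Int) = col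
      · rw [if_pos h2, if_pos (by omega : (c' : Int) = col ∧ a ≤ (r : Int) ∧ (r : Int) < b),
            h2.1]
      · rw [if_neg h2, if_neg (by omega)]

-- Int-index version of get-after-set
lemma pvCell_pvSetCell' {g : List (List Int)} (hsq : Sq g) {rs cs : Int} (v : Int)
    (hr0 : 0 ≤ rs) (hrn : rs < g.length) (hc0 : 0 ≤ cs) (hcn : cs < g.length)
    {r c : Int} (hr : 0 ≤ r ∧ r < g.length) (hc : 0 ≤ c ∧ c < g.length) :
    pvCell (pvSetCell g rs cs v) r c = if r = rs ∧ c = cs then v else pvCell g r c := by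
  have h := pvCell_pvSetCell hsq v hr0 hrn hc0 hcn r.toNat c.toNat (by omega) (by omega)
  rw [Int.toNat_of_nonneg hr.1, Int.toNat_of_nonneg hc.1] at h
  exact h

lemma pyGetD_append_lt (l1 l2 : List Int) (i : Int) (h0 : 0 ≤ i) (h : i < l1.length) :
    PySem.List.pyGetD (l1 ++ l2) i 0 = PySem.List.pyGetD l1 i 0 := by
  rw [PySem.List.pyGetD_eq_getElem _ _ h0 (by simp; omega),
      PySem.List.pyGetD_eq_getElem _ _ h0 h,
      List.getElem_append_left (by omega)]

lemma pyGetD_append_length (l : List Int) (v : Int) (i : Int) (h : i = l.length) :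
    PySem.List.pyGetD (l ++ [v]) i 0 = v := by
  subst h
  rw [PySem.List.pyGetD_eq_getElem _ _ (by omega) (by simp),
      List.getElem_append_right (by simp)]
  simp

-- A's inner-loop body
def stepA (col : Int) (st : List (List Int) × Int) (row : Int) : List (List Int) × Int :=
  if pvCell st.1 row col ≠ 0 then
    let g' := pvSetCell st.1 st.2 col (pvCell st.1 row col)
    let g'' := if st.2 ≠ row then pvSetCell g' row col 0 else g'
    (g'', st.2 - 1)
  else st

-- the non-zero entries of column col among rows 0..m-1, top to bottom
def vsOf (g : List (List Int)) (col : Int) (m : Nat) : List Int :=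
  nzf ((PySem.List.pyRange 0 (m : Int) 1).map (fun r => pvCell g r col))

lemma vsOf_zero (g : List (List Int)) (col : Int) : vsOf g col 0 = [] := by
  unfold vsOf nzf
  rw [Nat.cast_zero, PySem.List.pyRange_one_eq_nil le_rfl]
  rfl

lemma vsOf_succ (g : List (List Int)) (col : Int) (m : Nat) :
    vsOf g col (m + 1) = vsOf g col m ++
      (if pvCell g (m : Int) col ≠ 0 then [pvCell g (m : Int) col] else []) := by
  unfold vsOf nzf
  have h1 : ((m + 1 : Nat) : Int) = (m : Int) + 1 := by push_cast; ring
  rw [h1, PySem.List.pyRange_one_succ_right (by positivity), List.map_append,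
      List.filter_append, List.map_cons, List.map_nil, List.filter_singleton]
  by_cases hv : pvCell g (m : Int) col = 0 <;> simp [hv]

lemma vsOf_congr {g1 g2 : List (List Int)} (col : Int) (m : Nat)
    (h : ∀ r : Int, 0 ≤ r → r < (m : Int) → pvCell g1 r col = pvCell g2 r col) :
    vsOf g1 col m = vsOf g2 col m := by
  unfold vsOf nzf
  congr 1
  apply List.map_congr_left
  intro r hr
  rw [PySem.List.mem_pyRange_one] at hr
  exact h r hr.1 hr.2

lemma vsOf_len_le (g : List (List Int)) (col : Int) (m : Nat) :
    (vsOf g col m).length ≤ m := by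
  unfold vsOf nzf
  calc _ ≤ ((PySem.List.pyRange 0 (m : Int) 1).map (fun r => pvCell g r col)).length :=
        List.length_filter_le _ _
    _ = m := by rw [List.length_map, PySem.List.length_pyRange_one]; omega

-- characterization of A's fused two-pointer loop over rows m-1 .. 0
lemma gatherA_char (col : Int) :
    ∀ (m : Nat) (g : List (List Int)) (e : Int), Sq g → m ≤ g.length →
    (m : Int) - 1 ≤ e → e < g.length → 0 ≤ col → col < g.length →
    ((PySem.List.pyRange ((m : Int) - 1) (-1) (-1)).foldl (stepA col) (g, e)).2
        = e - (vsOf g col m).length ∧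
    ((PySem.List.pyRange ((m : Int) - 1) (-1) (-1)).foldl (stepA col) (g, e)).1.length
        = g.length ∧
    Sq ((PySem.List.pyRange ((m : Int) - 1) (-1) (-1)).foldl (stepA col) (g, e)).1 ∧
    (∀ r c' : Nat, r < g.length → c' < g.length →
      pvCell ((PySem.List.pyRange ((m : Int) - 1) (-1) (-1)).foldl (stepA col) (g, e)).1 r c' =
        if (c' : Int) = col then
          (if e - (vsOf g col m).length < (r : Int) ∧ (r : Int) ≤ e then
             PySem.List.pyGetD (vsOf g col m) ((r : Int) - (e - (vsOf g col m).length + 1)) 0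
           else if r < m then 0 else pvCell g r c')
        else pvCell g r c') := by
  intro m
  induction m with
  | zero =>
    intro g e hsq hm he1 he2 hc0 hcn
    rw [show ((0 : Nat) : Int) - 1 = -1 by norm_num, PySem.List.pyRange_neg_one_eq_nil le_rfl,
        List.foldl_nil]
    refine ⟨by rw [vsOf_zero]; simp, rfl, hsq, ?_⟩
    intro r c' hr hc
    rw [vsOf_zero]
    have hblk : ¬(e - (([] : List Int).length : Int) < (r : Int) ∧ (r : Int) ≤ e) := by
      simp only [List.length_nil, Nat.cast_zero]
      omega
    rw [if_neg hblk, if_neg (by omega : ¬ (r < 0))]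
    split <;> rfl
  | succ m ih =>
    intro g e hsq hm he1 he2 hc0 hcn
    have hme : (m : Int) ≤ e := by omega
    rw [show ((m + 1 : Nat) : Int) - 1 = (m : Int) by push_cast; ring,
        PySem.List.pyRange_neg_one_cons (by omega), List.foldl_cons]
    by_cases hv : pvCell g (m : Int) col = 0
    · -- the row is empty: state unchanged, vs unchanged
      have hst : stepA col (g, e) (m : Int) = (g, e) := by
        unfold stepA
        rw [if_neg (by simpa using hv)]
      rw [hst, show (m : Int) - 1 = ((m : Nat) : Int) - 1 by norm_num]
      obtain ⟨ih2, ihlen, ihsq, ihval⟩ := ih g e hsq (by omega) (by omega) he2 hc0 hcn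
      have hvs : vsOf g col (m + 1) = vsOf g col m := by
        rw [vsOf_succ, if_neg (by simpa using hv), List.append_nil]
      rw [hvs]
      refine ⟨ih2, ihlen, ihsq, ?_⟩
      intro r c' hr hc
      rw [ihval r c' hr hc]
      by_cases hcc : (c' : Int) = col
      · rw [if_pos hcc, if_pos hcc]
        by_cases hblk : e - (vsOf g col m).length < (r : Int) ∧ (r : Int) ≤ e
        · rw [if_pos hblk, if_pos hblk]
        · rw [if_neg hblk, if_neg hblk]
          by_cases hrm : r < m
          · rw [if_pos hrm, if_pos (by omega)]
          · by_cases hrm1 : r < m + 1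
            · -- r = m: the cell is 0 anyway
              rw [if_neg hrm, if_pos hrm1]
              have : (r : Int) = (m : Int) := by omega
              rw [show ((r : Nat) : Int) = (m : Int) from this, hcc, hv]
            · rw [if_neg hrm, if_neg hrm1]
      · rw [if_neg hcc, if_neg hcc]
    · -- non-zero: value moved to row e, source zeroed if different
      set v := pvCell g (m : Int) col with hvdef
      have h0e : 0 ≤ e := by omega
      have hst : stepA col (g, e) (m : Int) =
          (if e ≠ (m : Int) then pvSetCell (pvSetCell g e col v) (m : Int) col 0
           else pvSetCell g e col v, e - 1) := by
        unfold stepA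
        rw [if_pos (by simpa using hv)]
      set g'' := if e ≠ (m : Int) then pvSetCell (pvSetCell g e col v) (m : Int) col 0
          else pvSetCell g e col v with hg''
      have hlen'' : g''.length = g.length := by
        rw [hg'']; split <;> simp [len_pvSetCell]
      have hsq'' : Sq g'' := by
        rw [hg'']; split
        · exact sq_pvSetCell (sq_pvSetCell hsq e col v) (m : Int) col 0
        · exact sq_pvSetCell hsq e col v
      -- value of g'' at any in-range cell
      have hlen1 : (pvSetCell g e col v).length = g.length := len_pvSetCell g e col v
      have hsq1 : Sq (pvSetCell g e col v) := sq_pvSetCell hsq e col v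
      have h1 : ∀ r c : Int, 0 ≤ r → r < g.length → 0 ≤ c → c < g.length →
          pvCell (pvSetCell g e col v) r c = if r = e ∧ c = col then v else pvCell g r c :=
        fun r c hr0 hrN hc0' hcN =>
          pvCell_pvSetCell' hsq v h0e he2 hc0 hcn ⟨hr0, hrN⟩ ⟨hc0', hcN⟩
      have h2 : ∀ r c : Int, 0 ≤ r → r < g.length → 0 ≤ c → c < g.length →
          pvCell (pvSetCell (pvSetCell g e col v) (m : Int) col 0) r c =
            if r = (m : Int) ∧ c = col then 0 else pvCell (pvSetCell g e col v) r c :=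
        fun r c hr0 hrN hc0' hcN =>
          pvCell_pvSetCell' hsq1 0 (by omega) (by rw [hlen1]; omega)
            hc0 (by rw [hlen1]; omega) ⟨hr0, by rw [hlen1]; omega⟩ ⟨hc0', by rw [hlen1]; omega⟩
      have hcell : ∀ (r c : Int), 0 ≤ r → r < g.length → 0 ≤ c → c < g.length →
          pvCell g'' r c = if r = e ∧ c = col then v
            else if r = (m : Int) ∧ c = col then 0 else pvCell g r c := by
        intro r c hr0 hrN hc0' hcN
        rw [hg'']
        by_cases hem : e ≠ (m : Int)
        · rw [if_pos hem, h2 r c hr0 hrN hc0' hcN, h1 r c hr0 hrN hc0' hcN]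
          by_cases hA : r = (m : Int) ∧ c = col
          · rw [if_pos hA, if_neg (by omega), if_pos hA]
          · rw [if_neg hA]
            by_cases hB : r = e ∧ c = col
            · rw [if_pos hB, if_pos hB]
            · rw [if_neg hB, if_neg hB, if_neg hA]
        · rw [if_neg hem, h1 r c hr0 hrN hc0' hcN]
          have hem' : e = (m : Int) := by omega
          by_cases hB : r = e ∧ c = col
          · rw [if_pos hB, if_pos hB]
          · rw [if_neg hB, if_neg hB, if_neg (by rw [← hem']; exact hB)]
      have hvspres : vsOf g'' col m = vsOf g col m := by
        apply vsOf_congr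
        intro r hr0 hrm
        rw [hcell r col hr0 (by omega) hc0 hcn, if_neg (by omega), if_neg (by omega)]
      rw [hst, show (m : Int) - 1 = ((m : Nat) : Int) - 1 by norm_num]
      obtain ⟨ih2, ihlen, ihsq, ihval⟩ := ih g'' (e - 1) hsq''
        (by omega) (by omega) (by omega) hc0 (by omega)
      rw [hvspres] at ih2 ihval
      set w := vsOf g col m with hwdef
      have hvs : vsOf g col (m + 1) = w ++ [v] := by
        rw [vsOf_succ, if_pos (by simpa using hv)]
      rw [hvs]
      have hwm : w.length ≤ m := vsOf_len_le g col m
      refine ⟨by rw [ih2]; simp; omega, by rw [ihlen, hlen''], ihsq, ?_⟩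
      intro r c' hr hc
      rw [ihval r c' (by omega) (by omega),
          hcell r c' (by omega) (by omega) (by omega) (by omega)]
      have hlapp : ((w ++ [v]).length : Int) = (w.length : Int) + 1 := by simp
      by_cases hcc : (c' : Int) = col
      · rw [if_pos hcc, if_pos hcc]
        by_cases hblk : e - 1 - (w.length : Int) < (r : Int) ∧ (r : Int) ≤ e - 1
        · -- inside the old block: same entry of w
          rw [if_pos hblk,
              if_pos (show e - ((w ++ [v]).length : Int) < (r : Int) ∧ (r : Int) ≤ e by
                rw [hlapp]; omega),
              pyGetD_append_lt w [v] _ (by omega) (by omega)]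
          congr 1
          rw [hlapp]
          omega
        · by_cases hre : (r : Int) = e
          · -- the freshly filled row e: last entry v
            rw [if_neg hblk, if_neg (show ¬ (r < m) by omega),
                if_pos (⟨hre, hcc⟩ : (r : Int) = e ∧ (c' : Int) = col),
                if_pos (show e - ((w ++ [v]).length : Int) < (r : Int) ∧ (r : Int) ≤ e by
                  rw [hlapp]; omega),
                pyGetD_append_length w v _ (by rw [hlapp]; omega)]
          · have hnb : ¬ (e - ((w ++ [v]).length : Int) < (r : Int) ∧ (r : Int) ≤ e) := by
              rw [hlapp]; omega
            rw [if_neg hblk, if_neg hnb,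
                if_neg (show ¬ ((r : Int) = e ∧ (c' : Int) = col) from fun h => hre h.1)]
            by_cases hrm : r < m
            · rw [if_pos hrm, if_pos (show r < m + 1 by omega)]
            · rw [if_neg hrm]
              by_cases hrm1 : r < m + 1
              · rw [if_pos hrm1,
                    if_pos (⟨show (r : Int) = (m : Int) by omega, hcc⟩ :
                      (r : Int) = (m : Int) ∧ (c' : Int) = col)]
              · rw [if_neg hrm1,
                    if_neg (show ¬ ((r : Int) = (m : Int) ∧ (c' : Int) = col) by omega)]
      · rw [if_neg hcc, if_neg hcc,
            if_neg (show ¬ ((r : Int) = e ∧ (c' : Int) = col) from fun h => hcc h.2),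
            if_neg (show ¬ ((r : Int) = (m : Int) ∧ (c' : Int) = col) from fun h => hcc h.2)]

-- A's per-column loop: result, size and squareness, at m = n, e = n-1
lemma innerA_props (col : Int) (g : List (List Int)) (hsq : Sq g)
    (hc0 : 0 ≤ col) (hcn : col < g.length) :
    ((((PySem.List.pyRange ((g.length : Int) - 1) (-1) (-1)).foldl (stepA col)
        (g, (g.length : Int) - 1)).1.length = g.length) ∧
      Sq (((PySem.List.pyRange ((g.length : Int) - 1) (-1) (-1)).foldl (stepA col)
        (g, (g.length : Int) - 1)).1)) ∧
    (∀ r c' : Nat, r < g.length → c' < g.length →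
      pvCell (((PySem.List.pyRange ((g.length : Int) - 1) (-1) (-1)).foldl (stepA col)
          (g, (g.length : Int) - 1)).1) r c' =
        if (c' : Int) = col then
          (if ((g.length : Int) - (vsOf g col g.length).length) ≤ (r : Int) then
            PySem.List.pyGetD (vsOf g col g.length)
              ((r : Int) - ((g.length : Int) - (vsOf g col g.length).length)) 0
           else 0)
        else pvCell g r c') := by
  obtain ⟨h2, hlen, hsq', hval⟩ := gatherA_char col g.length g ((g.length : Int) - 1) hsq
    le_rfl le_rfl (by omega) hc0 hcn
  refine ⟨⟨hlen, hsq'⟩, ?_⟩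
  intro r c' hr hc
  rw [hval r c' hr hc]
  have hwlen : (vsOf g col g.length).length ≤ g.length := vsOf_len_le g col g.length
  by_cases hcc : (c' : Int) = col
  · rw [if_pos hcc, if_pos hcc]
    by_cases hblk : ((g.length : Int) - (vsOf g col g.length).length) ≤ (r : Int)
    · rw [if_pos (show ((g.length : Int) - 1) - (vsOf g col g.length).length < (r : Int) ∧
            (r : Int) ≤ (g.length : Int) - 1 by omega), if_pos hblk]
      congr 1
      omega
    · rw [if_neg (show ¬ (((g.length : Int) - 1) - (vsOf g col g.length).length < (r : Int) ∧
            (r : Int) ≤ (g.length : Int) - 1) by omega), if_neg hblk, if_pos hr]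
  · rw [if_neg hcc, if_neg hcc]

-- the per-column operations of A and B agree on square grids
lemma inner_eq (n : Int) (col : Int) (g : List (List Int)) (hsq : Sq g)
    (hn : n = g.length) (hc0 : 0 ≤ col) (hcn : col < n) :
    ((PySem.List.pyRange (n - 1) (-1) (-1)).foldl (fun st row =>
        if pvCell st.1 row col ≠ 0 then
          let g' := pvSetCell st.1 st.2 col (pvCell st.1 row col)
          let g'' := if st.2 ≠ row then pvSetCell g' row col 0 else g'
          (g'', st.2 - 1)
        else st) (g, n - 1)).1 =
    (let vals := ((PySem.List.pyRange 0 n 1).filter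
        (fun r => decide (pvCell g r col ≠ 0))).map (fun r => pvCell g r col)
     let k : Int := n - vals.length
     let g2 := (PySem.List.pyRange 0 k 1).foldl (fun g r => pvSetCell g r col 0) g
     (PySem.List.pyRange k n 1).foldl
       (fun g r => pvSetCell g r col (PySem.List.pyGetD vals (r - k) 0)) g2) := by
  subst hn
  have hstep : (fun (st : List (List Int) × Int) (row : Int) =>
      if pvCell st.1 row col ≠ 0 then
        let g' := pvSetCell st.1 st.2 col (pvCell st.1 row col)
        let g'' := if st.2 ≠ row then pvSetCell g' row col 0 else g'
        (g'', st.2 - 1)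
      else st) = stepA col := rfl
  rw [hstep]
  simp only []
  have hvals : ((PySem.List.pyRange 0 (g.length : Int) 1).filter
        (fun r => decide (pvCell g r col ≠ 0))).map (fun r => pvCell g r col)
      = vsOf g col g.length := by
    unfold vsOf nzf
    exact map_filter_comp (fun r => pvCell g r col) (fun v => decide (v ≠ 0)) _
  rw [hvals]
  set vs := vsOf g col g.length with hvs
  have hwlen : vs.length ≤ g.length := vsOf_len_le g col g.length
  set k : Int := (g.length : Int) - vs.length with hk
  obtain ⟨⟨halen, hasq⟩, haval⟩ := innerA_props col g hsq hc0 hcn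
  obtain ⟨⟨h1len, h1sq⟩, h1val⟩ :=
    scatter_aux col (fun _ => 0) (k - 0).toNat 0 k g rfl hsq le_rfl (by omega) hc0 hcn
  obtain ⟨⟨h2len, h2sq⟩, h2val⟩ :=
    scatter_aux col (fun r => PySem.List.pyGetD vs (r - k) 0)
      ((g.length : Int) - k).toNat k (g.length : Int)
      ((PySem.List.pyRange 0 k 1).foldl (fun g r => pvSetCell g r col 0) g) rfl h1sq
      (by omega) (by rw [h1len]) hc0 (by rw [h1len]; omega)
  apply grid_ext hasq h2sq (by rw [halen, h2len, h1len])
  intro r c' hr hc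
  rw [halen] at hr hc
  rw [haval r c' hr hc, h2val r c' (by rw [h1len]; omega) (by rw [h1len]; omega),
      h1val r c' hr hc]
  by_cases hcc : (c' : Int) = col
  · rw [if_pos hcc]
    by_cases hblk : k ≤ (r : Int)
    · rw [if_pos hblk, if_pos ⟨hcc, hblk, by omega⟩]
    · rw [if_neg hblk, if_neg (show ¬ ((c' : Int) = col ∧ k ≤ (r : Int) ∧
            (r : Int) < (g.length : Int)) by omega),
          if_pos ⟨hcc, by omega, by omega⟩]
  · rw [if_neg hcc,
        if_neg (show ¬ ((c' : Int) = col ∧ k ≤ (r : Int) ∧ (r : Int) < (g.length : Int))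
          from fun h => hcc h.1),
        if_neg (show ¬ ((c' : Int) = col ∧ 0 ≤ (r : Int) ∧ (r : Int) < k)
          from fun h => hcc h.1)]

-- the explosion loop only writes cells: size and squareness are preserved
lemma expl_pres (x y n : Int) :
    ∀ (l : List Int) (g : List (List Int)), Sq g →
    ((l.foldl (fun g i =>
        let g := if 0 ≤ x + i ∧ x + i < n then pvSetCell g (x + i) y 0 else g
        if 0 ≤ y + i ∧ y + i < n then pvSetCell g x (y + i) 0 else g) g).length = g.length ∧
     Sq (l.foldl (fun g i =>
        let g := if 0 ≤ x + i ∧ x + i < n then pvSetCell g (x + i) y 0 else g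
        if 0 ≤ y + i ∧ y + i < n then pvSetCell g x (y + i) 0 else g) g)) := by
  intro l
  induction l with
  | nil => exact fun g hsq => ⟨rfl, hsq⟩
  | cons i l ih =>
    intro g hsq
    rw [List.foldl_cons]
    have hstep : ∀ g' : List (List Int), Sq g' →
        ((if 0 ≤ y + i ∧ y + i < n then pvSetCell g' x (y + i) 0 else g').length = g'.length ∧
         Sq (if 0 ≤ y + i ∧ y + i < n then pvSetCell g' x (y + i) 0 else g')) := by
      intro g' hsq'
      split
      · exact ⟨len_pvSetCell g' x (y + i) 0, sq_pvSetCell hsq' x (y + i) 0⟩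
      · exact ⟨rfl, hsq'⟩
    by_cases h1 : 0 ≤ x + i ∧ x + i < n
    · simp only [if_pos h1]
      obtain ⟨hl1, hs1⟩ := hstep (pvSetCell g (x + i) y 0) (sq_pvSetCell hsq (x + i) y 0)
      obtain ⟨hl2, hs2⟩ := ih _ hs1
      exact ⟨by rw [hl2, hl1, len_pvSetCell], hs2⟩
    · simp only [if_neg h1]
      obtain ⟨hl1, hs1⟩ := hstep g hsq
      obtain ⟨hl2, hs2⟩ := ih _ hs1
      exact ⟨by rw [hl2, hl1], hs2⟩

-- the two gravity phases agree column by column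
lemma gravity_eq (n : Int) :
    ∀ (cols : List Int) (g : List (List Int)), Sq g → n = g.length →
    (∀ c ∈ cols, 0 ≤ c ∧ c < n) →
    cols.foldl (fun g col =>
      ((PySem.List.pyRange (n - 1) (-1) (-1)).foldl (fun st row =>
          if pvCell st.1 row col ≠ 0 then
            let g' := pvSetCell st.1 st.2 col (pvCell st.1 row col)
            let g'' := if st.2 ≠ row then pvSetCell g' row col 0 else g'
            (g'', st.2 - 1)
          else st) (g, n - 1)).1) g =
    cols.foldl (fun g col =>
      let vals := ((PySem.List.pyRange 0 n 1).filter
          (fun r => decide (pvCell g r col ≠ 0))).map (fun r => pvCell g r col)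
      let k : Int := n - vals.length
      let g2 := (PySem.List.pyRange 0 k 1).foldl (fun g r => pvSetCell g r col 0) g
      (PySem.List.pyRange k n 1).foldl
        (fun g r => pvSetCell g r col (PySem.List.pyGetD vals (r - k) 0)) g2) g := by
  intro cols
  induction cols with
  | nil => intro g _ _ _; rfl
  | cons c cols ih =>
    intro g hsq hn hmem
    rw [List.foldl_cons, List.foldl_cons]
    have hc := hmem c List.mem_cons_self
    have hhead := inner_eq n c g hsq hn hc.1 hc.2
    obtain ⟨⟨halen, hasq⟩, _⟩ := innerA_props c g hsq hc.1 (by omega)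
    rw [← hhead]
    have hstep : ((PySem.List.pyRange (n - 1) (-1) (-1)).foldl (fun st row =>
          if pvCell st.1 row c ≠ 0 then
            let g' := pvSetCell st.1 st.2 c (pvCell st.1 row c)
            let g'' := if st.2 ≠ row then pvSetCell g' row c 0 else g'
            (g'', st.2 - 1)
          else st) (g, n - 1)).1
        = ((PySem.List.pyRange ((g.length : Int) - 1) (-1) (-1)).foldl (stepA c)
            (g, (g.length : Int) - 1)).1 := by rw [← hn]; rfl
    exact ih _ (by rw [hstep]; exact hasq) (by rw [hstep, halen]; exact hn)
      (fun c' hc' => hmem c' (List.mem_cons_of_mem _ hc'))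

-- ===== VERDICT (by name: the statement is the Claim_ definition above) =====
theorem explode_and_apply_gravity_spec : Claim_equal_explode_and_apply_gravity := by
  intro grid x y _ hpre
  obtain ⟨hsq, hx, hy⟩ := hpre
  unfold Spec_explode_and_apply_gravity explode_and_apply_gravity explode_and_apply_gravity_alt
  simp only []
  apply gravity_eq
  · exact (expl_pres x y (grid.length : Int) _ grid hsq).2
  · rw [(expl_pres x y (grid.length : Int) _ grid hsq).1]
  · intro c hc
    rw [PySem.List.mem_pyRange_one] at hc
    exact hc
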